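-- pv_equiv track=rewrite | github.com/joy961208/Programmers-Coding-Test | Level 1/신규 아이디 추천.py | solution
-- ===== SOURCE A (Python) =====
-- def solution(new_id):
--     answer = ''
--     new_id = new_id.lower()
--     nums = "0123456789abcdefghijklmnopqrstuvwxyz.-_"
--     new_id = [i for i in new_id if i in nums]
--
--     if new_id == []:
--         return "aaa"
--
--     while True:
--         a = 0
--         if new_id[0] == ".":
--             new_id.remove(".")
--             a = 1
--         elif new_id[-1] == ".":
--             new_id.pop()
--             a = 1
--         if new_id == []:
--             return "aaa"
--         for i,j in enumerate(new_id[:-1]):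
--             if j == "." and new_id[i+1] == ".":
--                 new_id.pop(i)
--                 a = 1
--                 break
--         if a == 0:
--             break
--
--     if len(new_id) >= 16:
--         new_id = new_id[0:15]
--         if new_id[-1] == ".":
--             new_id.pop()
--
--     if len(new_id) == 2:
--         return new_id[0] + new_id[1]*2
--
--     elif len(new_id) == 1:
--         return new_id[0]*3
--
--     for i in new_id:
--         answer += i
--
--     return answer
-- ===== SOURCE B (Python) =====
-- def solution(new_id):
--     keep = "0123456789abcdefghijklmnopqrstuvwxyz.-_"
--     s = ''.join([c for c in new_id.lower() if c in keep])
--     s = '.'.join([p for p in s.split('.') if p])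
--     s = s[:15].rstrip('.')
--     if not s:
--         return "aaa"
--     return (s + s[-1] * 2)[:3] if len(s) < 3 else s
-- ===== Notes on version B (the rewrite author's own statement) =====
-- stated objective: faster
-- what changed: Replaced the fixed-point while-loop that rescans the whole list and deletes one dot per round by a single linear pipeline: filter allowed chars once, collapse dot runs and strip edge dots by splitting on the dot character and joining the nonempty parts, then truncate to 15, strip the trailing dot and pad to length 3.
import Mathlib
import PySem

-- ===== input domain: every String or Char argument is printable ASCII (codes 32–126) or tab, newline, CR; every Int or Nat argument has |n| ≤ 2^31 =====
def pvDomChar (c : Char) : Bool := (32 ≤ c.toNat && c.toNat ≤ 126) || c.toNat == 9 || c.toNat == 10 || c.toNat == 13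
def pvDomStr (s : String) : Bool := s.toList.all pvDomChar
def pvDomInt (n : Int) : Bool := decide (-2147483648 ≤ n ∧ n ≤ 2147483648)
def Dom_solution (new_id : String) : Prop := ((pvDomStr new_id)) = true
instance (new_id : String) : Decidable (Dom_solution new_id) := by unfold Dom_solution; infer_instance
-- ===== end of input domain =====

-- B replaces A's fixed-point while-loop (one whole-list rescan per deleted dot, quadratic on
-- dot-heavy input) by one linear split('.')/join pipeline that collapses dot runs and strips
-- edge dots in a single pass, then truncates/strips/pads.


-- ===== PORT A =====
-- nums = "0123456789abcdefghijklmnopqrstuvwxyz.-_"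
def pvNums : List Char := "0123456789abcdefghijklmnopqrstuvwxyz.-_".toList

-- the inner `for i,j in enumerate(new_id[:-1]): if j == "." and new_id[i+1] == ".": …; break`:
-- index of the first adjacent pair of dots (the loop pops at that index and breaks)
def findDotPair : List Char → Option Nat
  | a :: b :: t => if a = '.' ∧ b = '.' then some 0 else (findDotPair (b :: t)).map (· + 1)
  | _ => none

-- the `while True:` loop; returns none for the `return "aaa"` inside it.  Each iteration with
-- a = 1 removes exactly one element, so fuel = length + 1 makes the 0-fuel branch unreachable.
def loopA : Nat → List Char → Option (List Char)
  | 0, l => some l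
  | fuel + 1, l =>
    let p : List Char × Bool :=
      if l.head? = some '.' then ((PySem.List.remove? l '.').getD l, true)  -- new_id.remove(".")
      else if l.getLast? = some '.' then (l.dropLast, true)                 -- new_id.pop()
      else (l, false)
    if p.1 = [] then none
    else
      match findDotPair p.1 with
      | some i => loopA fuel (p.1.eraseIdx i)                               -- new_id.pop(i)
      | none => if p.2 then loopA fuel p.1 else some p.1

-- everything after the while-loop (truncate to 15, strip a trailing dot, pad short results)
def postA (t0 : List Char) : String :=
  let t := if t0.length ≥ 16 then
      (let t1 := t0.take 15          -- new_id[0:15] with 0 ≤ 0 ≤ 15: exactly take 15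
       if t1.getLast? = some '.' then t1.dropLast else t1)
    else t0
  -- list indices 0 and 1 are in range in these branches; List.getD is exact there
  if t.length = 2 then String.ofList [t.getD 0 ' ', t.getD 1 ' ', t.getD 1 ' ']
  else if t.length = 1 then String.ofList [t.getD 0 ' ', t.getD 0 ' ', t.getD 0 ' ']
  else t.foldl (fun acc c => acc.push c) ""   -- for i in new_id: answer += i

def solution (new_id : String) : String :=
  -- new_id = [i for i in new_id.lower() if i in nums]
  let l := (PySem.Str.lower new_id).toList.filter (fun c => pvNums.contains c)
  if l = [] then "aaa"
  else
    match loopA (l.length + 1) l with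
    | none => "aaa"
    | some t0 => postA t0

-- ===== PORT B =====
-- everything after B's join/split pipeline: truncate, strip trailing dots, pad short results
def postB (s2 : List Char) : String :=
  -- s[:15] with a nonnegative bound is take 15; s.rstrip('.') drops all trailing dots: exact
  let s3 := ((s2.take 15).reverse.dropWhile (fun c => c = '.')).reverse
  if s3 = [] then "aaa"
  else if s3.length < 3 then
    -- s[-1] indexes the nonempty s3; s + s[-1]*2 then [:3]
    String.ofList ((s3 ++ [s3.getLastD ' ', s3.getLastD ' ']).take 3)
  else String.ofList s3

def solution_alt (new_id : String) : String :=
  -- s = ''.join([c for c in new_id.lower() if c in keep])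
  let s := (PySem.Str.lower new_id).toList.filter (fun c => pvNums.contains c)
  -- s.split('.'): List.splitOn is exact for a one-char separator (keeps empty parts, [''] for '')
  let parts := s.splitOn '.'
  let s2 := PySem.Chars.join ['.'] (parts.filter (fun p => p ≠ []))  -- '.'.join([p for p in parts if p])
  postB s2

-- ===== PRECONDITION & SPEC =====
def Spec_solution (new_id : String) (out : String) : Prop := out = solution_alt new_id
instance (new_id : String) (out : String) : Decidable (Spec_solution new_id out) := by unfold Spec_solution; infer_instance

-- ===== CLAIM (what is proved, stated in full; the proofs are below) =====
def Claim_equal_solution : Prop := ∀ (new_id : String), Dom_solution new_id → Spec_solution new_id (solution new_id)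

-- ===== LEMMAS AND PROOFS =====

-- state of B's accumulator: empty / ends with '.' / ends with something else
inductive EState where
  | empty : EState
  | dot : EState
  | other : EState
deriving DecidableEq

def stOf (out : List Char) : EState :=
  if out = [] then .empty else if out.getLast? = some '.' then .dot else .other

-- what B's loop appends after state s, as a function of the remaining input
def emit : EState → List Char → List Char
  | _, [] => []
  | s, c :: t =>
    if c = '.' then
      match s with
      | .other => '.' :: emit .dot t
      | s => emit s t
    else if pvNums.contains c then c :: emit .other t
    else emit s t

def emitSt : EState → List Char → EState
  | s, [] => s
  | s, c :: t =>
    if c = '.' then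
      match s with
      | .other => emitSt .dot t
      | s => emitSt s t
    else if pvNums.contains c then emitSt .other t
    else emitSt s t

def pvP (l : List Char) : List Char := if l.getLast? = some '.' then l.dropLast else l
def pvN (l : List Char) : List Char := pvP (emit .empty l)

theorem stOf_concat (out : List Char) (c : Char) :
    stOf (out ++ [c]) = if c = '.' then EState.dot else EState.other := by
  simp [stOf]

theorem stOf_eq_other {l : List Char} (h : stOf l = .other) :
    l ≠ [] ∧ l.getLast? ≠ some '.' := by
  constructor
  · rintro rfl; simp [stOf] at h
  · intro hl
    by_cases he : l = [] <;> simp [stOf, he, hl] at h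

-- unfolding equations for emit / emitSt
theorem emit_cons_dot_other (t : List Char) : emit .other ('.' :: t) = '.' :: emit .dot t := by
  simp [emit]
theorem emit_cons_dot_empty (t : List Char) : emit .empty ('.' :: t) = emit .empty t := by
  simp [emit]
theorem emit_cons_dot_dot (t : List Char) : emit .dot ('.' :: t) = emit .dot t := by
  simp [emit]
theorem emit_cons_keep (s : EState) {c : Char} (hc : c ≠ '.') (hm : pvNums.contains c = true)
    (t : List Char) : emit s (c :: t) = c :: emit .other t := by
  have hm' : c ∈ pvNums := by simpa using hm
  cases s <;> simp [emit, hc, hm']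
theorem emit_cons_skip (s : EState) {c : Char} (hc : c ≠ '.') (hm : ¬pvNums.contains c = true)
    (t : List Char) : emit s (c :: t) = emit s t := by
  have hm' : c ∉ pvNums := by simpa using hm
  cases s <;> simp [emit, hc, hm']
theorem emitSt_cons_dot_other (t : List Char) : emitSt .other ('.' :: t) = emitSt .dot t := by
  simp [emitSt]
theorem emitSt_cons_dot_empty (t : List Char) : emitSt .empty ('.' :: t) = emitSt .empty t := by
  simp [emitSt]
theorem emitSt_cons_dot_dot (t : List Char) : emitSt .dot ('.' :: t) = emitSt .dot t := by
  simp [emitSt]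
theorem emitSt_cons_keep (s : EState) {c : Char} (hc : c ≠ '.') (hm : pvNums.contains c = true)
    (t : List Char) : emitSt s (c :: t) = emitSt .other t := by
  have hm' : c ∈ pvNums := by simpa using hm
  cases s <;> simp [emitSt, hc, hm']
theorem emitSt_cons_skip (s : EState) {c : Char} (hc : c ≠ '.') (hm : ¬pvNums.contains c = true)
    (t : List Char) : emitSt s (c :: t) = emitSt s t := by
  have hm' : c ∉ pvNums := by simpa using hm
  cases s <;> simp [emitSt, hc, hm']

theorem st_emit (l : List Char) : ∀ out, stOf (out ++ emit (stOf out) l) = emitSt (stOf out) l := by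
  induction l with
  | nil => intro out; simp [emit, emitSt]
  | cons c t ih =>
    intro out
    by_cases hc : c = '.'
    · subst hc
      cases h : stOf out with
      | other =>
        rw [emit_cons_dot_other, emitSt_cons_dot_other]
        have := ih (out ++ ['.'])
        rw [stOf_concat, if_pos rfl] at this
        rw [show out ++ '.' :: emit .dot t = (out ++ ['.']) ++ emit .dot t from by simp]
        exact this
      | empty =>
        rw [emit_cons_dot_empty, emitSt_cons_dot_empty]
        have := ih out; rw [h] at this; exact this
      | dot =>
        rw [emit_cons_dot_dot, emitSt_cons_dot_dot]
        have := ih out; rw [h] at this; exact this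
    · by_cases hm : pvNums.contains c
      · rw [emit_cons_keep _ hc hm, emitSt_cons_keep _ hc hm]
        have := ih (out ++ [c])
        rw [stOf_concat, if_neg hc] at this
        rw [show out ++ c :: emit .other t = (out ++ [c]) ++ emit .other t from by simp]
        exact this
      · rw [emit_cons_skip _ hc hm, emitSt_cons_skip _ hc hm]
        exact ih out
  
theorem emit_append (u : List Char) : ∀ s v, emit s (u ++ v) = emit s u ++ emit (emitSt s u) v := by
  induction u with
  | nil => intro s v; simp [emit, emitSt]
  | cons c t ih =>
    intro s v
    by_cases hc : c = '.'
    · subst hc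
      cases s with
      | other =>
        rw [List.cons_append, emit_cons_dot_other, emit_cons_dot_other, emitSt_cons_dot_other, ih]
        simp
      | empty =>
        rw [List.cons_append, emit_cons_dot_empty, emit_cons_dot_empty, emitSt_cons_dot_empty, ih]
      | dot =>
        rw [List.cons_append, emit_cons_dot_dot, emit_cons_dot_dot, emitSt_cons_dot_dot, ih]
    · by_cases hm : pvNums.contains c
      · rw [List.cons_append, emit_cons_keep _ hc hm, emit_cons_keep _ hc hm,
          emitSt_cons_keep _ hc hm, ih]
        simp
      · rw [List.cons_append, emit_cons_skip _ hc hm, emit_cons_skip _ hc hm,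
          emitSt_cons_skip _ hc hm, ih]

theorem emit_pair (v : List Char) : ∀ s, emit s ('.' :: '.' :: v) = emit s ('.' :: v) := by
  intro s
  cases s with
  | other => rw [emit_cons_dot_other, emit_cons_dot_other, emit_cons_dot_dot]
  | empty => rw [emit_cons_dot_empty, emit_cons_dot_empty]
  | dot => rw [emit_cons_dot_dot, emit_cons_dot_dot]

theorem pvN_pair (u v : List Char) : pvN (u ++ '.' :: '.' :: v) = pvN (u ++ '.' :: v) := by
  unfold pvN
  rw [emit_append, emit_append, emit_pair]

theorem pvN_head_dot (t : List Char) : pvN ('.' :: t) = pvN t := by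
  unfold pvN
  rw [emit_cons_dot_empty]

theorem getLast?_decomp {l : List Char} {c : Char} (h : l.getLast? = some c) :
    l = l.dropLast ++ [c] := by
  have hne : l ≠ [] := by rintro rfl; simp at h
  conv_lhs => rw [← List.dropLast_append_getLast hne]
  rw [List.getLast?_eq_some_getLast hne] at h
  rw [Option.some_inj.mp h]

theorem pvN_last_dot (l : List Char) (h : l.getLast? = some '.') :
    pvN l.dropLast = pvN l := by
  have hdec : l = l.dropLast ++ ['.'] := getLast?_decomp h
  set u := l.dropLast with hu
  unfold pvN
  conv_rhs => rw [hdec]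
  rw [emit_append]
  have hst : stOf (emit (stOf ([] : List Char)) u) = emitSt (stOf ([] : List Char)) u := by
    simpa using st_emit u []
  have hst0 : stOf ([] : List Char) = .empty := by simp [stOf]
  rw [hst0] at hst
  cases hs : emitSt .empty u with
  | empty =>
    rw [hs] at hst
    rw [emit_cons_dot_empty]
    simp [emit]
  | dot =>
    rw [emit_cons_dot_dot]
    simp [emit]
  | other =>
    rw [hs] at hst
    obtain ⟨hne', hl'⟩ := stOf_eq_other hst
    rw [emit_cons_dot_other, show emit EState.dot ([] : List Char) = [] from rfl]
    unfold pvP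
    rw [if_neg hl', if_pos (List.getLast?_concat), List.dropLast_concat]

theorem findDotPair_cons_cons_none {a b : Char} {t : List Char}
    (h : findDotPair (a :: b :: t) = none) :
    ¬(a = '.' ∧ b = '.') ∧ findDotPair (b :: t) = none := by
  by_cases hp : a = '.' ∧ b = '.'
  · simp [findDotPair, hp] at h
  · refine ⟨hp, ?_⟩
    simpa [findDotPair, hp] using h

theorem findDotPair_none_tail {c : Char} {t : List Char}
    (h : findDotPair (c :: t) = none) : findDotPair t = none := by
  cases t with
  | nil => rfl
  | cons b t' => exact (findDotPair_cons_cons_none h).2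

theorem emit_stable (l : List Char) : ∀ s, (∀ c ∈ l, pvNums.contains c = true) →
    findDotPair l = none → (l.head? = some '.' → s = .other) → emit s l = l := by
  induction l with
  | nil => intro s _ _ _; rfl
  | cons c t ih =>
    intro s hmem hfp hhd
    have hfpt : findDotPair t = none := findDotPair_none_tail hfp
    by_cases hc : c = '.'
    · subst hc
      have hs : s = .other := hhd rfl
      subst hs
      have hht : t.head? = some '.' → EState.dot = EState.other := by
        intro hh
        cases t with
        | nil => simp at hh
        | cons b t' =>
          have hb : b = '.' := by simpa using hh
          exact absurd ⟨rfl, hb⟩ (findDotPair_cons_cons_none hfp).1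
      rw [emit_cons_dot_other, ih .dot (fun x hx => hmem x (List.mem_cons_of_mem _ hx)) hfpt hht]
    · have hm : pvNums.contains c := hmem c List.mem_cons_self
      rw [emit_cons_keep _ hc hm, ih .other (fun x hx => hmem x (List.mem_cons_of_mem _ hx)) hfpt (fun _ => rfl)]

theorem pvN_stable (l : List Char) (hmem : ∀ c ∈ l, pvNums.contains c = true)
    (hfp : findDotPair l = none) (hhd : l.head? ≠ some '.') (hlast : l.getLast? ≠ some '.') :
    pvN l = l := by
  unfold pvN
  rw [emit_stable l .empty hmem hfp (fun h => absurd h hhd)]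
  simp [pvP, hlast]

theorem findDotPair_some (l : List Char) : ∀ i, findDotPair l = some i →
    ∃ u v, l = u ++ '.' :: '.' :: v ∧ l.eraseIdx i = u ++ '.' :: v := by
  induction l with
  | nil => intro i h; simp [findDotPair] at h
  | cons a t ih =>
    intro i h
    cases t with
    | nil => simp [findDotPair] at h
    | cons b t' =>
      by_cases hp : a = '.' ∧ b = '.'
      · have hi : i = 0 := by simpa [findDotPair, hp] using h.symm
        exact ⟨[], t', by simp [hp.1, hp.2], by simp [hi, hp.1, hp.2]⟩
      · simp only [findDotPair, if_neg hp, Option.map_eq_some_iff] at h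
        obtain ⟨j, hj, rfl⟩ := h
        obtain ⟨u, v, hdec, herase⟩ := ih j hj
        exact ⟨a :: u, v, by simp [hdec], by simp [List.eraseIdx_cons_succ, herase]⟩

theorem erase_facts {l : List Char} {i : ℕ} (h : findDotPair l = some i) :
    pvN (l.eraseIdx i) = pvN l ∧ l.eraseIdx i ≠ [] ∧ (l.eraseIdx i).length + 1 = l.length := by
  obtain ⟨u, v, hdec, herase⟩ := findDotPair_some l i h
  refine ⟨?_, by rw [herase]; simp, by rw [herase, hdec]; simp; omega⟩
  rw [herase, hdec, pvN_pair]

theorem pvSubMem {l m : List Char} (hs : l.Sublist m) (hmem : ∀ c ∈ m, pvNums.contains c = true) :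
    ∀ c ∈ l, pvNums.contains c = true := fun c hc => hmem c (hs.subset hc)

theorem loopA_succ_head_dot (fuel : ℕ) (t : List Char) :
    loopA (fuel+1) ('.' :: t) =
      if t = [] then none else
        match findDotPair t with
        | some i => loopA fuel (t.eraseIdx i)
        | none => loopA fuel t := by
  simp [loopA, PySem.List.remove?_cons_self]

theorem loopA_succ_last_dot (fuel : ℕ) (l : List Char) (hh : l.head? ≠ some '.')
    (hl : l.getLast? = some '.') :
    loopA (fuel+1) l =
      if l.dropLast = [] then none else
        match findDotPair l.dropLast with
        | some i => loopA fuel (l.dropLast.eraseIdx i)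
        | none => loopA fuel l.dropLast := by
  simp [loopA, hh, hl]

theorem loopA_succ_clean (fuel : ℕ) (l : List Char) (hh : l.head? ≠ some '.')
    (hl : l.getLast? ≠ some '.') :
    loopA (fuel+1) l =
      if l = [] then none else
        match findDotPair l with
        | some i => loopA fuel (l.eraseIdx i)
        | none => some l := by
  simp [loopA, hh, hl]

theorem head_dot_of_head? {l : List Char} (hh : l.head? = some '.') :
    ∃ t, l = '.' :: t := by
  cases l with
  | nil => simp at hh
  | cons a t =>
    have ha : a = '.' := by simpa using hh
    exact ⟨t, by rw [ha]⟩

theorem dropLast_ne_nil {l : List Char} (hh : l.head? ≠ some '.')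
    (hl : l.getLast? = some '.') : l.dropLast ≠ [] := by
  intro hd
  cases l with
  | nil => simp at hl
  | cons a t =>
    cases t with
    | nil =>
      simp at hl
      simp [hl] at hh
    | cons b t' => simp at hd

theorem loopA_eq_pvN : ∀ fuel (l : List Char), l.length < fuel → l ≠ [] →
    (∀ c ∈ l, pvNums.contains c = true) →
    loopA fuel l = if pvN l = [] then none else some (pvN l) := by
  intro fuel
  induction fuel with
  | zero => intro l h; omega
  | succ fuel ih =>
    intro l hlen hne hmem
    by_cases hh : l.head? = some '.'
    · obtain ⟨t, rfl⟩ := head_dot_of_head? hh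
      have hNl : pvN ('.' :: t) = pvN t := pvN_head_dot t
      rw [loopA_succ_head_dot]
      by_cases ht : t = []
      · subst ht
        simp [pvN, pvP, emit]
      · rw [if_neg ht]
        have htmem : ∀ c ∈ t, pvNums.contains c = true :=
          fun c hc => hmem c (List.mem_cons_of_mem _ hc)
        have htlen : t.length < fuel := by simp at hlen; omega
        cases hfp : findDotPair t with
        | some i =>
          obtain ⟨hN, hne', hlen'⟩ := erase_facts hfp
          show loopA fuel (t.eraseIdx i) = _
          rw [ih _ (by omega) hne' (pvSubMem (List.eraseIdx_sublist t i) htmem), hN, hNl]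
        | none =>
          show loopA fuel t = _
          rw [ih _ htlen ht htmem, hNl]
    · by_cases hl : l.getLast? = some '.'
      · have hdne : l.dropLast ≠ [] := dropLast_ne_nil hh hl
        have hNl : pvN l.dropLast = pvN l := pvN_last_dot l hl
        have hdmem := pvSubMem (List.dropLast_sublist l) hmem
        have hdlen : l.dropLast.length < fuel := by
          have h1 : l.dropLast.length = l.length - 1 := List.length_dropLast
          have hlp : 0 < l.length := List.length_pos_iff.mpr hne
          omega
        rw [loopA_succ_last_dot fuel l hh hl, if_neg hdne]
        cases hfp : findDotPair l.dropLast with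
        | some i =>
          obtain ⟨hN, hne', hlen'⟩ := erase_facts hfp
          show loopA fuel (l.dropLast.eraseIdx i) = _
          rw [ih _ (by omega) hne' (pvSubMem (List.eraseIdx_sublist _ i) hdmem), hN, hNl]
        | none =>
          show loopA fuel l.dropLast = _
          rw [ih _ hdlen hdne hdmem, hNl]
      · rw [loopA_succ_clean fuel l hh hl, if_neg hne]
        cases hfp : findDotPair l with
        | some i =>
          obtain ⟨hN, hne', hlen'⟩ := erase_facts hfp
          show loopA fuel (l.eraseIdx i) = _
          rw [ih _ (by omega) hne' (pvSubMem (List.eraseIdx_sublist _ i) hmem), hN]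
        | none =>
          have hst : pvN l = l := pvN_stable l hmem hfp hh hl
          show some l = _
          rw [hst, if_neg hne]

theorem loopA_last : ∀ fuel (l r : List Char), l.length < fuel → loopA fuel l = some r →
    r.getLast? ≠ some '.' ∧ findDotPair r = none := by
  intro fuel
  induction fuel with
  | zero => intro l r h; omega
  | succ fuel ih =>
    intro l r hlen hr
    by_cases hh : l.head? = some '.'
    · obtain ⟨t, rfl⟩ := head_dot_of_head? hh
      rw [loopA_succ_head_dot] at hr
      by_cases ht : t = []
      · simp [ht] at hr
      · rw [if_neg ht] at hr
        have htlen : t.length < fuel := by simp at hlen; omega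
        cases hfp : findDotPair t with
        | some i =>
          rw [hfp] at hr
          obtain ⟨-, -, hlen'⟩ := erase_facts hfp
          exact ih (t.eraseIdx i) r (by omega) hr
        | none =>
          rw [hfp] at hr
          exact ih t r htlen hr
    · by_cases hl : l.getLast? = some '.'
      · rw [loopA_succ_last_dot fuel l hh hl] at hr
        have hdne : l.dropLast ≠ [] := dropLast_ne_nil hh hl
        rw [if_neg hdne] at hr
        have hdlen : l.dropLast.length < fuel := by
          have h1 : l.dropLast.length = l.length - 1 := List.length_dropLast
          have hlp : 0 < l.length := by
            rcases l with _ | _ <;> simp_all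
          omega
        cases hfp : findDotPair l.dropLast with
        | some i =>
          rw [hfp] at hr
          obtain ⟨-, -, hlen'⟩ := erase_facts hfp
          exact ih (l.dropLast.eraseIdx i) r (by omega) hr
        | none =>
          rw [hfp] at hr
          exact ih l.dropLast r hdlen hr
      · rw [loopA_succ_clean fuel l hh hl] at hr
        by_cases hne : l = []
        · simp [hne] at hr
        · rw [if_neg hne] at hr
          cases hfp : findDotPair l with
          | some i =>
            rw [hfp] at hr
            obtain ⟨-, -, hlen'⟩ := erase_facts hfp
            exact ih (l.eraseIdx i) r (by omega) hr
          | none =>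
            rw [hfp] at hr
            have hr' : l = r := Option.some.inj hr
            exact ⟨hr' ▸ hl, hr' ▸ hfp⟩

theorem foldl_push (t : List Char) : ∀ s : String,
    t.foldl (fun acc c => acc.push c) s = String.ofList (s.toList ++ t) := by
  induction t with
  | nil =>
    intro s
    apply String.toList_inj.mp
    simp
  | cons c t ih =>
    intro s
    rw [List.foldl_cons, ih]
    apply String.toList_inj.mp
    simp

theorem truncA (t0 : List Char) (hlast : t0.getLast? ≠ some '.') :
    (if t0.length ≥ 16 then
        (if (t0.take 15).getLast? = some '.' then (t0.take 15).dropLast else t0.take 15)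
      else t0) = pvP (t0.take 15) := by
  by_cases h16 : t0.length ≥ 16
  · simp only [if_pos h16, pvP]
  · rw [if_neg h16, List.take_of_length_le (by omega)]
    simp [pvP, hlast]

theorem emit_dot_eq_empty : ∀ l, emit .dot l = emit .empty l := by
  intro l
  induction l with
  | nil => rfl
  | cons c t ih =>
    by_cases hc : c = '.'
    · subst hc; rw [emit_cons_dot_dot, emit_cons_dot_empty, ih]
    · by_cases hm : pvNums.contains c
      · rw [emit_cons_keep _ hc hm, emit_cons_keep _ hc hm]
      · rw [emit_cons_skip _ hc hm, emit_cons_skip _ hc hm, ih]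

theorem emit_other_nodot : ∀ t, (∀ c ∈ t, pvNums.contains c = true) → '.' ∉ t →
    emit .other t = t := by
  intro t
  induction t with
  | nil => intro _ _; rfl
  | cons c t ih =>
    intro hmem hnd
    have hc : c ≠ '.' := fun h => hnd (h ▸ List.mem_cons_self)
    have hm : pvNums.contains c = true := hmem c List.mem_cons_self
    rw [emit_cons_keep _ hc hm,
      ih (fun x hx => hmem x (List.mem_cons_of_mem _ hx)) (fun h => hnd (List.mem_cons_of_mem _ h))]

theorem emitSt_other_nodot : ∀ t, (∀ c ∈ t, pvNums.contains c = true) → '.' ∉ t →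
    emitSt .other t = .other := by
  intro t
  induction t with
  | nil => intro _ _; rfl
  | cons c t ih =>
    intro hmem hnd
    have hc : c ≠ '.' := fun h => hnd (h ▸ List.mem_cons_self)
    have hm : pvNums.contains c = true := hmem c List.mem_cons_self
    rw [emitSt_cons_keep _ hc hm,
      ih (fun x hx => hmem x (List.mem_cons_of_mem _ hx)) (fun h => hnd (List.mem_cons_of_mem _ h))]

theorem emit_empty_nodot (p : List Char) (hmem : ∀ c ∈ p, pvNums.contains c = true)
    (hnd : '.' ∉ p) : emit .empty p = p := by
  cases p with
  | nil => rfl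
  | cons c t =>
    have hc : c ≠ '.' := fun h => hnd (h ▸ List.mem_cons_self)
    have hm : pvNums.contains c = true := hmem c List.mem_cons_self
    rw [emit_cons_keep _ hc hm,
      emit_other_nodot t (fun x hx => hmem x (List.mem_cons_of_mem _ hx))
        (fun h => hnd (List.mem_cons_of_mem _ h))]

theorem emitSt_empty_nodot (p : List Char) (hne : p ≠ [])
    (hmem : ∀ c ∈ p, pvNums.contains c = true) (hnd : '.' ∉ p) :
    emitSt .empty p = .other := by
  cases p with
  | nil => exact absurd rfl hne
  | cons c t =>
    have hc : c ≠ '.' := fun h => hnd (h ▸ List.mem_cons_self)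
    have hm : pvNums.contains c = true := hmem c List.mem_cons_self
    rw [emitSt_cons_keep _ hc hm,
      emitSt_other_nodot t (fun x hx => hmem x (List.mem_cons_of_mem _ hx))
        (fun h => hnd (List.mem_cons_of_mem _ h))]

theorem pvP_append (u : List Char) {v : List Char} (hv : v ≠ []) :
    pvP (u ++ v) = u ++ pvP v := by
  unfold pvP
  rw [List.getLast?_append_of_ne_nil u hv]
  split
  · rw [List.dropLast_append_of_ne_nil hv]
  · rfl

theorem emit_empty_head : ∀ l, emit .empty l = [] ∨
    ∃ c r, emit .empty l = c :: r ∧ c ≠ '.' := by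
  intro l
  induction l with
  | nil => exact Or.inl rfl
  | cons c t ih =>
    by_cases hc : c = '.'
    · subst hc; rw [emit_cons_dot_empty]; exact ih
    · by_cases hm : pvNums.contains c
      · rw [emit_cons_keep _ hc hm]; exact Or.inr ⟨c, _, rfl, hc⟩
      · rw [emit_cons_skip _ hc hm]; exact ih

theorem pvP_cons_ne_nil {c : Char} (r : List Char) (hc : c ≠ '.') : pvP (c :: r) ≠ [] := by
  unfold pvP
  split
  · rename_i hlast
    cases r with
    | nil => simp at hlast; exact absurd hlast hc
    | cons b r' => simp
  · simp

theorem emit_empty_eq_nil_of_pvP {x : List Char} (hx : x = emit .empty ((l : List Char)))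
    (h : pvP x = []) : x = [] := by
  rcases emit_empty_head l with h0 | ⟨c, r, hcr, hc⟩
  · rw [hx, h0]
  · rw [hx, hcr] at h
    exact absurd h (pvP_cons_ne_nil r hc)

theorem dropWhile_head_false {p : Char → Bool} : ∀ {l : List Char} {c : Char} {r : List Char},
    l.dropWhile p = c :: r → p c = false := by
  intro l
  induction l with
  | nil => intro c r h; simp at h
  | cons a t ih =>
    intro c r h
    by_cases hp : p a
    · rw [List.dropWhile_cons_of_pos hp] at h; exact ih h
    · rw [List.dropWhile_cons_of_neg hp] at h
      cases h
      simpa using hp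

theorem splitOn_dot_cons (t : List Char) : (('.' :: t).splitOn '.') = [] :: t.splitOn '.' := by
  simp [List.splitOn, List.splitOnP_cons]

theorem splitOn_cons_ne {c : Char} (t : List Char) (hc : c ≠ '.') :
    ((c :: t).splitOn '.') = (t.splitOn '.').modifyHead (c :: ·) := by
  simp [List.splitOn, List.splitOnP_cons, hc]

theorem splitOn_nodot : ∀ (l : List Char), '.' ∉ l → l.splitOn '.' = [l] := by
  intro l
  induction l with
  | nil => intro _; rfl
  | cons c t ih =>
    intro hnd
    have hc : c ≠ '.' := fun h => hnd (h ▸ List.mem_cons_self)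
    rw [splitOn_cons_ne t hc, ih (fun h => hnd (List.mem_cons_of_mem _ h))]
    rfl

theorem splitOn_append_dot : ∀ (p rest : List Char), '.' ∉ p →
    ((p ++ '.' :: rest).splitOn '.') = p :: rest.splitOn '.' := by
  intro p
  induction p with
  | nil => intro rest _; rw [List.nil_append, splitOn_dot_cons]
  | cons c q ih =>
    intro rest hnd
    have hc : c ≠ '.' := fun h => hnd (h ▸ List.mem_cons_self)
    rw [List.cons_append, splitOn_cons_ne _ hc, ih rest (fun h => hnd (List.mem_cons_of_mem _ h))]
    rfl

theorem join_cons_ne_nil {q : List Char} (rest : List (List Char)) (hq : q ≠ []) :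
    PySem.Chars.join ['.'] (q :: rest) ≠ [] := by
  cases rest with
  | nil => rw [PySem.Chars.join_singleton]; exact hq
  | cons r rs =>
    rw [PySem.Chars.join_cons_cons]
    simp [hq]

theorem pvN_nodot (l : List Char) (hmem : ∀ c ∈ l, pvNums.contains c = true)
    (hnd : '.' ∉ l) : pvN l = l := by
  unfold pvN
  rw [emit_empty_nodot l hmem hnd]
  unfold pvP
  split
  · rename_i hlast
    exact absurd (List.mem_of_getLast? hlast) hnd
  · rfl

-- the '.'.join([p for p in s.split('.') if p]) pipeline computes exactly pvN on filtered input
theorem J_eq_pvN : ∀ (n : ℕ) (l : List Char), l.length ≤ n →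
    (∀ c ∈ l, pvNums.contains c = true) →
    PySem.Chars.join ['.'] ((l.splitOn '.').filter (fun p => p ≠ [])) = pvN l := by
  intro n
  induction n with
  | zero =>
    intro l hlen _
    have : l = [] := by cases l <;> simp_all
    subst this
    rfl
  | succ n ih =>
    intro l hlen hmem
    cases l with
    | nil => rfl
    | cons a t =>
      by_cases ha : a = '.'
      · subst ha
        rw [splitOn_dot_cons]
        rw [show (([] :: t.splitOn '.').filter (fun p => p ≠ [])) =
              (t.splitOn '.').filter (fun p => p ≠ []) from by simp]
        rw [ih t (by simpa using hlen) (fun x hx => hmem x (List.mem_cons_of_mem _ hx))]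
        rw [pvN_head_dot]
      · -- decompose a :: t as p0 ++ d with p0 dot-free and d empty or starting with '.'
        set l := a :: t with hl
        set p0 := l.takeWhile (fun c => c ≠ '.') with hp0
        set d := l.dropWhile (fun c => c ≠ '.') with hd
        have hsplitl : p0 ++ d = l := List.takeWhile_append_dropWhile
        have hp0nodot : '.' ∉ p0 := by
          intro h
          have := List.mem_takeWhile_imp h
          simp at this
        have hp0mem : ∀ c ∈ p0, pvNums.contains c = true := by
          intro c hc
          exact hmem c (hsplitl ▸ List.mem_append_left d hc)
        have hp0ne : p0 ≠ [] := by
          rw [hp0, hl, List.takeWhile_cons_of_pos (by simpa using ha)]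
          simp
        cases hdc : d with
        | nil =>
          have hnodot : '.' ∉ l := by
            intro h
            rw [← hsplitl] at h
            rcases List.mem_append.mp h with h1 | h2
            · exact hp0nodot h1
            · rw [hdc] at h2; simp at h2
          rw [splitOn_nodot l hnodot]
          rw [show ([l].filter (fun p => p ≠ [])) = [l] from by simp [hl]]
          rw [PySem.Chars.join_singleton, pvN_nodot l hmem hnodot]
        | cons c rest =>
          have hcdot : c = '.' := by
            have := dropWhile_head_false (hd ▸ hdc : l.dropWhile (fun c => c ≠ '.') = c :: rest)
            simpa using this
          subst hcdot
          have hldec : l = p0 ++ '.' :: rest := by rw [← hsplitl, hdc]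
          have hrestmem : ∀ c ∈ rest, pvNums.contains c = true := by
            intro x hx
            exact hmem x (hldec ▸ List.mem_append_right p0 (List.mem_cons_of_mem _ hx))
          have hrestlen : rest.length ≤ n := by
            have h1 : l.length = p0.length + rest.length + 1 := by
              rw [hldec]; simp; omega
            omega
          have hJr := ih rest hrestlen hrestmem
          -- pvN l = pvP (p0 ++ '.' :: emit .empty rest)
          have hNl : pvN l = pvP (p0 ++ '.' :: emit .empty rest) := by
            unfold pvN
            rw [hldec, emit_append, emit_empty_nodot p0 hp0mem hp0nodot,
              emitSt_empty_nodot p0 hp0ne hp0mem hp0nodot, emit_cons_dot_other,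
              emit_dot_eq_empty]
          rw [hldec, splitOn_append_dot p0 rest hp0nodot,
            List.filter_cons_of_pos (by simpa using hp0ne)]
          rw [← hldec, hNl]
          cases hflt : (rest.splitOn '.').filter (fun p => p ≠ []) with
          | nil =>
            rw [PySem.Chars.join_singleton]
            rw [hflt, PySem.Chars.join_nil] at hJr
            have hx : emit .empty rest = [] :=
              emit_empty_eq_nil_of_pvP (l := rest) rfl hJr.symm
            rw [hx]
            unfold pvP
            rw [if_pos (List.getLast?_concat), List.dropLast_concat]
          | cons q rest' =>
            have hqne : q ≠ [] := by
              have : q ∈ (rest.splitOn '.').filter (fun p => p ≠ []) := by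
                rw [hflt]; exact List.mem_cons_self
              simpa using (List.mem_filter.mp this).2
            have hJrne : PySem.Chars.join ['.'] (q :: rest') ≠ [] := join_cons_ne_nil rest' hqne
            have hxne : emit .empty rest ≠ [] := by
              intro hx
              rw [hflt] at hJr
              have hzero : pvN rest = [] := by unfold pvN; rw [hx]; rfl
              exact hJrne (hJr.trans hzero)
            rw [PySem.Chars.join_cons_cons, ← hflt, hJr]
            rw [pvP_append p0 (by simp),
              show ('.' :: emit EState.empty rest) = ['.'] ++ emit EState.empty rest from rfl,
              pvP_append ['.'] hxne]
            simp [pvN]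

theorem noPair_take : ∀ (l : List Char) (n : ℕ), findDotPair l = none →
    findDotPair (l.take n) = none := by
  intro l
  induction l with
  | nil => intro n _; rw [List.take_nil]; rfl
  | cons a t ih =>
    intro n h
    cases n with
    | zero => rfl
    | succ n =>
      rw [List.take_succ_cons]
      cases t with
      | nil => rw [List.take_nil]; rfl
      | cons b t' =>
        obtain ⟨hpair, hrest⟩ := findDotPair_cons_cons_none h
        cases n with
        | zero => rfl
        | succ n =>
          have htail := ih (n+1) hrest
          rw [List.take_succ_cons] at htail ⊢
          show findDotPair (a :: b :: t'.take n) = none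
          simp [findDotPair, hpair, htail]

theorem pair_append_not_none : ∀ (w v : List Char), findDotPair (w ++ '.' :: '.' :: v) ≠ none := by
  intro w
  induction w with
  | nil => intro v h; simp [findDotPair] at h
  | cons a w' ih =>
    intro v h
    cases w' with
    | nil =>
      by_cases hp : a = '.' <;> simp [findDotPair, hp] at h
    | cons b w'' =>
      rw [List.cons_append] at h
      by_cases hp : a = '.' ∧ b = '.'
      · rw [List.cons_append] at h
        simp [findDotPair, hp] at h
      · rw [show (b :: w'') ++ '.' :: '.' :: v = b :: (w'' ++ '.' :: '.' :: v) from rfl] at h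
        simp only [findDotPair, if_neg hp, Option.map_eq_none_iff] at h
        exact ih v h

theorem rstrip_eq_pvP (l : List Char) (h : findDotPair l = none) :
    (l.reverse.dropWhile (fun c => c = '.')).reverse = pvP l := by
  cases hl : l.getLast? with
  | none =>
    have : l = [] := by cases l <;> simp_all
    subst this
    rfl
  | some c =>
    by_cases hc : c = '.'
    · subst hc
      have hdec : l = l.dropLast ++ ['.'] := getLast?_decomp hl
      have hpP : pvP l = l.dropLast := by unfold pvP; rw [if_pos hl]
      rw [hpP]
      conv_lhs => rw [hdec]
      rw [List.reverse_append]
      rw [show (['.'] : List Char).reverse ++ l.dropLast.reverse =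
            '.' :: l.dropLast.reverse from rfl]
      rw [List.dropWhile_cons_of_pos (by simp)]
      by_cases hune : l.dropLast = []
      · rw [hune]; rfl
      · have hrev : l.dropLast.reverse = l.dropLast.getLast hune :: l.dropLast.dropLast.reverse := by
          conv_lhs => rw [← List.dropLast_append_getLast hune]
          simp
        have hgl : l.dropLast.getLast hune ≠ '.' := by
          intro hgl
          apply pair_append_not_none l.dropLast.dropLast [] ?_
          have : l = l.dropLast.dropLast ++ ['.', '.'] := by
            conv_lhs => rw [hdec]
            conv_lhs => rw [← List.dropLast_append_getLast hune, hgl]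
            simp
          rw [← this]
          exact h
        rw [hrev, List.dropWhile_cons_of_neg (by simpa using hgl), ← hrev,
          List.reverse_reverse]
    · have hdec : l = l.dropLast ++ [c] := getLast?_decomp hl
      have hpP : pvP l = l := by
        unfold pvP
        rw [hl, if_neg (by simpa using hc)]
      rw [hpP]
      conv_lhs => rw [hdec]
      rw [List.reverse_append,
        show ([c] : List Char).reverse ++ l.dropLast.reverse = c :: l.dropLast.reverse from rfl,
        List.dropWhile_cons_of_neg (by simpa using hc),
        ← show ([c] : List Char).reverse ++ l.dropLast.reverse = c :: l.dropLast.reverse from rfl,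
        ← List.reverse_append, ← hdec, List.reverse_reverse]

theorem post_eq (t0 : List Char) (hne : t0 ≠ []) (hlast : t0.getLast? ≠ some '.')
    (hfp : findDotPair t0 = none) : postA t0 = postB t0 := by
  simp only [postA, postB]
  rw [truncA t0 hlast, rstrip_eq_pvP _ (noPair_take t0 15 hfp)]
  set t := pvP (t0.take 15) with ht
  have htne : t ≠ [] := by
    by_cases h16 : t0.length ≥ 16
    · have hlen15 : (t0.take 15).length = 15 := by
        rw [List.length_take]; omega
      rw [ht]
      unfold pvP
      split
      · intro hcon
        have hld := List.length_dropLast (xs := t0.take 15)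
        rw [hcon] at hld
        simp [hlen15] at hld
      · intro hcon; rw [hcon] at hlen15; simp at hlen15
    · rw [ht, List.take_of_length_le (by omega)]
      unfold pvP
      rw [if_neg hlast]
      exact hne
  rw [if_neg htne]
  rcases t with _ | ⟨a, _ | ⟨b, _ | ⟨c, r⟩⟩⟩
  · exact absurd rfl htne
  · simp [List.getD, List.getLastD]
  · simp [List.getD, List.getLastD]
  · have h3 : (a :: b :: c :: r).length = r.length + 3 := by simp
    rw [if_neg (by omega), if_neg (by omega), if_neg (by omega)]
    rw [foldl_push]
    simp

-- ===== VERDICT (by name: the statement is the Claim_ definition above) =====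
theorem solution_spec : Claim_equal_solution := by
  intro new_id _
  unfold Spec_solution solution solution_alt
  dsimp only
  set m := (PySem.Str.lower new_id).toList.filter (fun c => pvNums.contains c) with hm
  have hmem : ∀ c ∈ m, pvNums.contains c = true := by
    intro c hc
    exact (List.mem_filter.mp hc).2
  have hJ : PySem.Chars.join ['.'] ((m.splitOn '.').filter (fun p => p ≠ [])) = pvN m :=
    J_eq_pvN m.length m le_rfl hmem
  rw [hJ]
  by_cases hme : m = []
  · rw [if_pos hme, hme]
    rfl
  · rw [if_neg hme]
    have hloop := loopA_eq_pvN (m.length + 1) m (by omega) hme hmem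
    by_cases hN : pvN m = []
    · rw [hloop, if_pos hN, hN]
      rfl
    · rw [hloop, if_neg hN]
      show postA (pvN m) = postB (pvN m)
      obtain ⟨hlast, hfp⟩ := loopA_last (m.length + 1) m (pvN m) (by omega)
        (by rw [hloop, if_neg hN])
      exact post_eq (pvN m) hN hlast hfp
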